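-- pv_equiv track=rewrite | github.com/simonjoee/bullet-trade | bullet_trade/core/scheduler.py | _split_relative_components
-- ===== SOURCE A (Python) =====
-- from typing import Callable, Dict, Iterable, List, Optional, Sequence, Tuple, Any
--
-- def _split_relative_components(expr: str) -> Optional[Tuple[str, Optional[str], Optional[str]]]:
--     """拆分相对时间表达式为 (base, sign, offset_str)。
--     - 允许 "open"/"close"（无偏移）
--     - 允许 "open+30m"/"close-10s" 等形式
--     非法形式返回 None。
--     """
--     for base in ("open", "close"):
--         if expr == base:
--             return base, None, None
--         if expr.startswith(base):
--             if len(expr) == len(base):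
--                 return base, None, None
--             sign = expr[len(base)]
--             if sign not in "+-":
--                 return None
--             offset_str = expr[len(base) + 1 :]
--             return base, sign, offset_str
--     return None
-- ===== SOURCE B (Python) =====
-- def _split_relative_components(expr):
--     """Single left-to-right scan: cut at the first '+'/'-' and validate the base."""
--     for k, ch in enumerate(expr):
--         if ch in "+-":
--             base = expr[:k]
--             if base in ("open", "close"):
--                 return base, ch, expr[k + 1:]
--             return None
--     return (expr, None, None) if expr in ("open", "close") else None
-- ===== Notes on version B (the rewrite author's own statement) =====
-- stated objective: alternative
-- what changed: Replaced A's loop over the two base words with startswith/length/slicing by a single left-to-right scan that cuts the string at the first '+'/'-' character and then validates the base prefix.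
import Mathlib
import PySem

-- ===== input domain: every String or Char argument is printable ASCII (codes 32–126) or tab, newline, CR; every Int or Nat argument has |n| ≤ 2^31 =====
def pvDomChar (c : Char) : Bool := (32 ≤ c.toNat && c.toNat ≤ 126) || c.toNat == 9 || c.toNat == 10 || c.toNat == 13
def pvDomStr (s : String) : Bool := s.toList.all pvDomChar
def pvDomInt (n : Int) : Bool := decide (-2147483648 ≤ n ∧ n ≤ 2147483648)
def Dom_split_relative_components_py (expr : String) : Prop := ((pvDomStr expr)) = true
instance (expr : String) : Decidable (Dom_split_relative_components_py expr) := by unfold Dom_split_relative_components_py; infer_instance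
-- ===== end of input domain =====

-- B replaces A's loop over the two base words (startswith + slicing) by one left-to-right
-- scan that cuts the string at the first '+'/'-' and validates the base; objective: alternative.

-- ===== PORT A =====
-- literal port of A: for base in ("open","close"): eq / startswith / sign / slice
def pvA_loop (e : List Char) : List (List Char) → Option (String × Option String × Option String)
  | [] => none
  | base :: rest =>
    if e = base then some (String.ofList base, none, none)
    else if PySem.Chars.startswith e base then
      if e.length = base.length then some (String.ofList base, none, none)
      else
        match PySem.List.pyGet? e ((base.length : Int)) with
        | none => none  -- unreachable: len(e) > len(base) here, index in range
        | some sign =>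
          if sign = '+' ∨ sign = '-' then
            some (String.ofList base, some (String.ofList [sign]),
                  some (String.ofList (PySem.List.slice e (some ((base.length : Int) + 1)) none)))
          else none
    else pvA_loop e rest

def split_relative_components_py (expr : String) : Option (String × Option String × Option String) :=
  pvA_loop expr.toList [['o','p','e','n'], ['c','l','o','s','e']]

-- ===== PORT B =====
-- literal port of B: scan for the first '+'/'-', carrying the prefix seen so far (expr[:k])
def pvB_scan : List Char → List Char → Option (String × Option String × Option String)
  | pre, [] =>
    if pre = ['o','p','e','n'] ∨ pre = ['c','l','o','s','e'] then
      some (String.ofList pre, none, none)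
    else none
  | pre, c :: cs =>
    if c = '+' ∨ c = '-' then
      if pre = ['o','p','e','n'] ∨ pre = ['c','l','o','s','e'] then
        some (String.ofList pre, some (String.ofList [c]), some (String.ofList cs))
      else none
    else pvB_scan (pre ++ [c]) cs

def split_relative_components_py_alt (expr : String) : Option (String × Option String × Option String) :=
  pvB_scan [] expr.toList

-- ===== PRECONDITION & SPEC =====
def Spec_split_relative_components_py (expr : String) (out : Option (String × Option String × Option String)) : Prop := out = split_relative_components_py_alt expr
instance (expr : String) (out : Option (String × Option String × Option String)) : Decidable (Spec_split_relative_components_py expr out) := by unfold Spec_split_relative_components_py; infer_instance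

-- ===== CLAIM (what is proved, stated in full; the proofs are below) =====
def Claim_equal_split_relative_components_py : Prop := ∀ (expr : String), Dom_split_relative_components_py expr → Spec_split_relative_components_py expr (split_relative_components_py expr)

-- ===== LEMMAS AND PROOFS =====

-- B's scan returns none when no prefix of the remaining input can complete pre to a base word
theorem pv_dead_scan : ∀ (l pre : List Char),
    (∀ t, t <+: l → pre ++ t ≠ ['o','p','e','n'] ∧ pre ++ t ≠ ['c','l','o','s','e']) →
    pvB_scan pre l = none := by
  intro l
  induction l with
  | nil =>
    intro pre h
    have h0 := h [] (List.nil_prefix)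
    simp at h0
    simp [pvB_scan, h0.1, h0.2]
  | cons c cs ih =>
    intro pre h
    have h0 := h [] (List.nil_prefix)
    simp at h0
    simp only [pvB_scan]
    by_cases hc : c = '+' ∨ c = '-'
    · simp [hc, h0.1, h0.2]
    · simp only [if_neg hc]
      exact ih (pre ++ [c]) (by
        intro t ht
        have := h (c :: t) (by exact List.cons_prefix_cons.mpr ⟨rfl, ht⟩)
        simpa using this)

theorem pv_open_case : ∀ rest : List Char,
    pvA_loop (['o','p','e','n'] ++ rest) [['o','p','e','n'], ['c','l','o','s','e']]
      = pvB_scan [] (['o','p','e','n'] ++ rest) := by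
  intro rest
  cases rest with
  | nil => decide
  | cons c rs =>
    have hs : PySem.Chars.startswith ('o'::'p'::'e'::'n'::c::rs) ['o','p','e','n'] = true :=
      (PySem.Chars.startswith_iff _ _).mpr ⟨c :: rs, rfl⟩
    have hget : PySem.List.pyGet? ('o'::'p'::'e'::'n'::c::rs) (4:Int) = some c := by
      have h := PySem.List.pyGet?_append_length (pre := ['o','p','e','n']) (y := c) (ys := rs)
      push_cast at h; exact h
    by_cases hc : c = '+' ∨ c = '-'
    · simp [pvA_loop, pvB_scan, hs, hget, hc, PySem.List.slice_from, List.drop]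
    · simp [pvA_loop, pvB_scan, hs, hget, hc]
      symm; apply pv_dead_scan
      intro t ht
      constructor
      · intro he; simpa using congrArg List.length he
      · intro he; simp at he

theorem pv_close_case : ∀ rest : List Char,
    pvA_loop (['c','l','o','s','e'] ++ rest) [['o','p','e','n'], ['c','l','o','s','e']]
      = pvB_scan [] (['c','l','o','s','e'] ++ rest) := by
  intro rest
  have hno : PySem.Chars.startswith ('c'::'l'::'o'::'s'::'e'::rest) ['o','p','e','n'] = false := by
    rw [Bool.eq_false_iff]
    intro h
    obtain ⟨t, ht⟩ := (PySem.Chars.startswith_iff _ _).mp h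
    simp at ht
  cases rest with
  | nil =>
    simp [pvA_loop, pvB_scan, hno]
  | cons c rs =>
    have hs : PySem.Chars.startswith ('c'::'l'::'o'::'s'::'e'::c::rs) ['c','l','o','s','e'] = true :=
      (PySem.Chars.startswith_iff _ _).mpr ⟨c :: rs, rfl⟩
    have hno : PySem.Chars.startswith ('c'::'l'::'o'::'s'::'e'::c::rs) ['o','p','e','n'] = false := by
      rw [Bool.eq_false_iff]
      intro h
      obtain ⟨t, ht⟩ := (PySem.Chars.startswith_iff _ _).mp h
      simp at ht
    have hget : PySem.List.pyGet? ('c'::'l'::'o'::'s'::'e'::c::rs) (5:Int) = some c := by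
      have h := PySem.List.pyGet?_append_length (pre := ['c','l','o','s','e']) (y := c) (ys := rs)
      push_cast at h; exact h
    by_cases hc : c = '+' ∨ c = '-'
    · simp [pvA_loop, pvB_scan, hs, hno, hget, hc, PySem.List.slice_from, List.drop]
    · simp [pvA_loop, pvB_scan, hs, hno, hget, hc]
      symm; apply pv_dead_scan
      intro t ht
      constructor
      · intro he; simpa using congrArg List.length he
      · intro he; simpa using congrArg List.length he

theorem pv_neither_case : ∀ e : List Char,
    ¬ (['o','p','e','n'] <+: e) → ¬ (['c','l','o','s','e'] <+: e) →
    pvA_loop e [['o','p','e','n'], ['c','l','o','s','e']] = pvB_scan [] e := by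
  intro e h1 h2
  have s1 : PySem.Chars.startswith e ['o','p','e','n'] = false := by
    rw [Bool.eq_false_iff]; intro h; exact h1 ((PySem.Chars.startswith_iff _ _).mp h)
  have s2 : PySem.Chars.startswith e ['c','l','o','s','e'] = false := by
    rw [Bool.eq_false_iff]; intro h; exact h2 ((PySem.Chars.startswith_iff _ _).mp h)
  have e1 : e ≠ ['o','p','e','n'] := by rintro rfl; exact h1 (List.prefix_refl _)
  have e2 : e ≠ ['c','l','o','s','e'] := by rintro rfl; exact h2 (List.prefix_refl _)
  rw [pv_dead_scan e [] (by
    intro t ht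
    simp only [List.nil_append]
    exact ⟨fun h => h1 (h ▸ ht), fun h => h2 (h ▸ ht)⟩)]
  simp [pvA_loop, s1, s2, e1, e2]

-- ===== VERDICT (by name: the statement is the Claim_ definition above) =====
theorem split_relative_components_py_spec : Claim_equal_split_relative_components_py := by
  intro expr _
  unfold Spec_split_relative_components_py split_relative_components_py split_relative_components_py_alt
  by_cases h1 : ['o','p','e','n'] <+: expr.toList
  · obtain ⟨rest, hrest⟩ := h1
    rw [← hrest]
    exact pv_open_case rest
  · by_cases h2 : ['c','l','o','s','e'] <+: expr.toList
    · obtain ⟨rest, hrest⟩ := h2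
      rw [← hrest]
      exact pv_close_case rest
    · exact pv_neither_case _ h1 h2
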